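-- pv_equiv track=rewrite | github.com/daniel-reich/ubiquitous-fiesta | XALogvSrMr3LRwXPH_11.py | is_shuffled_well
-- ===== SOURCE A (Python) =====
-- def is_shuffled_well(lst):
--
--   First = 0
--   Second = 1
--   Third = 2
--   Length = len(lst)
--
--   while (Third < Length):
--     Item_A = lst[First]
--     Item_B = lst[Second]
--     Item_C = lst[Third]
--
--     Test_A = Item_B - Item_A
--     Test_B = Item_C - Item_B
--
--     if (Test_A == 1) and (Test_B == 1):
--       return False
--     elif (Test_A == -1) and (Test_B == -1):
--       return False
--     else:
--       First += 1
--       Second += 1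
--       Third += 1
--
--   return True
-- ===== SOURCE B (Python) =====
-- def is_shuffled_well(lst):
--     # State machine over single elements: track the previous element, the
--     # previous step, and the length (streak) of the current run of equal +-1
--     # steps; reject as soon as a streak of two such steps appears.
--     streak = 0
--     prev_step = 0
--     last = None
--     for x in lst:
--         if last is not None:
--             step = x - last
--             if step in (1, -1) and step == prev_step:
--                 streak += 1
--             elif step in (1, -1):
--                 streak = 1
--             else:
--                 streak = 0
--             if streak >= 2:
--                 return False
--             prev_step = step
--         last = x
--     return True
-- ===== Notes on version B (the rewrite author's own statement) =====
-- stated objective: alternative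
-- what changed: B is a single-element state machine (previous element, previous step, streak counter of consecutive equal +-1 steps, rejecting when the streak reaches 2) instead of A's three-index sliding-window loop that re-indexes a triple and recomputes two differences per step.
import Mathlib
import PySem

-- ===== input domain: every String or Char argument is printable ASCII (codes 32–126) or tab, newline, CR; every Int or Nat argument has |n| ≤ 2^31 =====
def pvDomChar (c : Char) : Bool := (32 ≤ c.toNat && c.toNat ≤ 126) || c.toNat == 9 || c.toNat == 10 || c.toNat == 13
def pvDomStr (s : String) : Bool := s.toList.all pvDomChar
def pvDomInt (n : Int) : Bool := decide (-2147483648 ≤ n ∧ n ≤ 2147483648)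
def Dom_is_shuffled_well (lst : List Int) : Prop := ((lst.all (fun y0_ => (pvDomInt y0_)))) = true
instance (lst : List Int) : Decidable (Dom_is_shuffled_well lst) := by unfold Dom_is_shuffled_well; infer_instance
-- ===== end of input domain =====

-- B replaces A's three-index sliding-window loop by a single-element state machine
-- tracking (last element, previous step, streak of equal ±1 steps) (objective: alternative).

-- ===== PORT A =====
-- A's while loop: three running indices, two subtractions recomputed at every step.
def iswLoop (lst : List Int) (first second third : Nat) : Bool :=
  if third < lst.length then
    match PySem.List.pyGet? lst first, PySem.List.pyGet? lst second, PySem.List.pyGet? lst third with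
    | some itemA, some itemB, some itemC =>
      let testA := itemB - itemA
      let testB := itemC - itemB
      if testA == 1 && testB == 1 then false
      else if testA == -1 && testB == -1 then false
      else iswLoop lst (first + 1) (second + 1) (third + 1)
    | _, _, _ => true  -- unreachable: second = first+1, third = first+2 < length
  else true
termination_by lst.length - third

def is_shuffled_well (lst : List Int) : Bool := iswLoop lst 0 1 2

-- ===== PORT B =====
-- the for-loop over single elements with state (last, prev_step, streak), early return on streak ≥ 2
def iswScan : List Int → Option Int → Int → Nat → Bool
  | [], _, _, _ => true
  | x :: rest, none, prevStep, streak => iswScan rest (some x) prevStep streak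
  | x :: rest, some l, prevStep, streak =>
    let step := x - l
    let streak' := if (step == 1 || step == -1) && step == prevStep then streak + 1
                   else if step == 1 || step == -1 then 1 else 0
    if streak' ≥ 2 then false else iswScan rest (some x) step streak'

def is_shuffled_well_alt (lst : List Int) : Bool := iswScan lst none 0 0

-- ===== PRECONDITION & SPEC =====
def Spec_is_shuffled_well (lst : List Int) (out : Bool) : Prop := out = is_shuffled_well_alt lst
instance (lst : List Int) (out : Bool) : Decidable (Spec_is_shuffled_well lst out) := by unfold Spec_is_shuffled_well; infer_instance

-- ===== CLAIM (what is proved, stated in full; the proofs are below) =====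
def Claim_equal_is_shuffled_well : Prop := ∀ (lst : List Int), Dom_is_shuffled_well lst → Spec_is_shuffled_well lst (is_shuffled_well lst)

-- ===== LEMMAS AND PROOFS =====
-- common yardstick: structural "no three consecutive ±1 run" predicate
def noTriple : List Int → Bool
  | a :: b :: c :: r => if b - a = c - b ∧ (b - a = 1 ∨ b - a = -1) then false else noTriple (b :: c :: r)
  | _ => true

lemma iswLoop_shift (n : Nat) : ∀ (x : Int) (xs : List Int) (f s t : Nat), xs.length - t ≤ n →
    iswLoop (x :: xs) (f + 1) (s + 1) (t + 1) = iswLoop xs f s t := by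
  induction n with
  | zero =>
    intro x xs f s t h
    rw [iswLoop]
    conv_rhs => rw [iswLoop]
    have ht : ¬ t < xs.length := by omega
    simp [ht]
  | succ n ih =>
    intro x xs f s t h
    rw [iswLoop]
    conv_rhs => rw [iswLoop]
    by_cases ht : t < xs.length
    · have ht' : t + 1 < (x :: xs).length := by simp; omega
      simp only [ht, ht', if_pos, List.length_cons, PySem.List.pyGet?_natCast,
        Nat.cast_add, Nat.cast_one]
      rw [show ((f:Int) + 1) = ((f+1 : Nat) : Int) by push_cast; ring,
          show ((s:Int) + 1) = ((s+1 : Nat) : Int) by push_cast; ring,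
          show ((t:Int) + 1) = ((t+1 : Nat) : Int) by push_cast; ring]
      simp only [PySem.List.pyGet?_natCast, List.getElem?_cons_succ]
      rcases hf : xs[f]? with _ | a <;> rcases hs : xs[s]? with _ | b <;> rcases hh : xs[t]? with _ | c <;>
        simp only [hf, hs, hh] <;> try simp
      simp [ht, ih x xs (f+1) (s+1) (t+1) (by omega)]
    · have : ¬ t + 1 < (x :: xs).length := by simp; omega
      simp [ht, this]

lemma loop_eq_noTriple (n : Nat) : ∀ (lst : List Int), lst.length ≤ n →
    iswLoop lst 0 1 2 = noTriple lst := by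
  induction n with
  | zero =>
    intro lst h
    have : lst = [] := List.eq_nil_of_length_eq_zero (by omega)
    subst this
    rw [iswLoop]; simp [noTriple]
  | succ n ih =>
    intro lst h
    match lst with
    | [] => rw [iswLoop]; simp [noTriple]
    | [a] => rw [iswLoop]; simp [noTriple]
    | [a, b] => rw [iswLoop]; simp [noTriple]
    | a :: b :: c :: r =>
      rw [iswLoop]
      have h2 : 2 < (a :: b :: c :: r).length := by simp
      simp only [h2, if_pos, PySem.List.pyGet?_natCast]
      norm_num
      have hsh := iswLoop_shift n a (b::c::r) 0 1 2 (by simp only [List.length_cons] at h ⊢; omega)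
      norm_num at hsh
      rw [hsh, ih (b::c::r) (by simp only [List.length_cons] at h ⊢; omega)]
      rw [noTriple]
      by_cases e1 : b - a = 1 ∧ c - b = 1
      · rw [if_pos ⟨by omega, Or.inl e1.1⟩]; simp [e1.1, e1.2]
      · by_cases e2 : b - a = -1 ∧ c - b = -1
        · rw [if_pos ⟨by omega, Or.inr e2.1⟩]; simp [e2.1, e2.2]
        · have hn : ¬ (b - a = c - b ∧ (b - a = 1 ∨ b - a = -1)) := by
            rintro ⟨he, h1 | h1⟩
            · exact e1 ⟨h1, by omega⟩
            · exact e2 ⟨h1, by omega⟩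
          rw [if_neg hn]
          rcases not_and_or.mp e1 with u | u <;> rcases not_and_or.mp e2 with v | v <;> simp [u, v]

-- invariant-carrying step lemma: a reachable state (some b, p, enc p) behaves like
-- noTriple with a virtual previous element b - p
lemma scan_eq_noTriple : ∀ (rest : List Int) (b p : Int),
    iswScan rest (some b) p (if p = 1 ∨ p = -1 then 1 else 0) = noTriple ((b - p) :: b :: rest) := by
  intro rest
  induction rest with
  | nil => intro b p; simp [iswScan, noTriple]
  | cons c r ih =>
    intro b p
    rw [iswScan, noTriple]
    have hb : b - (b - p) = p := by ring
    rw [hb]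
    by_cases hp1 : (c - b = 1 ∨ c - b = -1) ∧ c - b = p
    · have : p = c - b := hp1.2.symm
      subst this
      simp only [hp1.1, hp1.2]
      rcases hp1.1 with h | h <;> simp [h]
    · have hne : ¬ (p = c - b ∧ (p = 1 ∨ p = -1)) := by
        intro ⟨h1, h2⟩; exact hp1 ⟨by omega, by omega⟩
      rw [if_neg hne]
      by_cases hpm : c - b = 1 ∨ c - b = -1
      · have hnp : ¬ (c - b = p) := fun h => hp1 ⟨hpm, h⟩
        have h1 : (((c - b == 1 || c - b == -1) && c - b == p) = true) = False := by
          simp [hnp]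
        have : (if (c - b == 1 || c - b == -1) && c - b == p then
                  (if p = 1 ∨ p = -1 then 1 else 0) + 1
                else if c - b == 1 || c - b == -1 then 1 else 0) = (1 : Nat) := by
          rcases hpm with h | h
          · have hq : ¬ ((1 : Int) = p) := by omega
            simp [h, hq]
          · have hq : ¬ ((-1 : Int) = p) := by omega
            simp [h, hq]
        rw [this]
        have h2 : ¬ (1 : Nat) ≥ 2 := by omega
        rw [if_neg h2]
        have := ih c (c - b)
        rw [if_pos hpm] at this
        rw [this]
        have : c - (c - b) = b := by ring
        rw [this]
      · have : (if (c - b == 1 || c - b == -1) && c - b == p then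
                  (if p = 1 ∨ p = -1 then 1 else 0) + 1
                else if c - b == 1 || c - b == -1 then 1 else 0) = (0 : Nat) := by
          have h1 : ¬ (c - b = 1) := fun h => hpm (Or.inl h)
          have h2 : ¬ (c - b = -1) := fun h => hpm (Or.inr h)
          simp [h1, h2]
        rw [this]
        have h2 : ¬ (0 : Nat) ≥ 2 := by omega
        rw [if_neg h2]
        have := ih c (c - b)
        rw [if_neg hpm] at this
        rw [this]
        have : c - (c - b) = b := by ring
        rw [this]

lemma alt_eq_noTriple : ∀ (lst : List Int), is_shuffled_well_alt lst = noTriple lst := by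
  intro lst
  match lst with
  | [] => rfl
  | [a] => rfl
  | a :: b :: r =>
    show iswScan (b :: r) (some a) 0 0 = _
    have h0 : (0 : Nat) = if (0 : Int) = 1 ∨ (0 : Int) = -1 then 1 else 0 := by norm_num
    rw [h0, scan_eq_noTriple (b :: r) a 0]
    rw [noTriple]
    have : ¬ (b - (a - 0) = 1 ∨ b - (a - 0) = -1) ∨ True := Or.inr trivial
    have hsub : a - (0:Int) = a := by ring
    rw [hsub]
    by_cases h : a - a = b - a ∧ (a - a = 1 ∨ a - a = -1)
    · omega
    · rw [if_neg h]

-- ===== VERDICT (by name: the statement is the Claim_ definition above) =====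
theorem is_shuffled_well_spec : Claim_equal_is_shuffled_well := by
  intro lst _
  unfold Spec_is_shuffled_well is_shuffled_well
  rw [loop_eq_noTriple lst.length lst le_rfl, alt_eq_noTriple]
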